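-- pv_equiv track=rewrite | github.com/pypi-data/pypi-mirror-211 | packages/pyGachi/pyGachi-1.3.tar.gz/pyGachi-1.3/pyGachi/prog14.py | replace_delimiters
-- ===== SOURCE A (Python) =====
-- def replace_delimiters(string):
--     result = ""
--     delimiter_flag = False
--
--     for char in string:
--         if char in [',', '.', '?', '!', ':', ';', ' ', '\t']:
--             if not delimiter_flag:
--                 result += "*"
--                 delimiter_flag = True
--         else:
--             result += char
--             delimiter_flag = False
--
--     return result
-- ===== SOURCE B (Python) =====
-- from itertools import groupby
--
-- def replace_delimiters(string):
--     delims = {',', '.', '?', '!', ':', ';', ' ', '\t'}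
--     pieces = []
--     for is_delim, group in groupby(string, key=lambda c: c in delims):
--         pieces.append('*' if is_delim else ''.join(group))
--     return ''.join(pieces)
-- ===== Notes on version B (the rewrite author's own statement) =====
-- stated objective: idiomatic
-- what changed: Replaces the per-character delimiter-flag state machine with itertools.groupby run-grouping: each delimiter run maps to a single star and each non-delimiter run is joined verbatim; joining collected pieces also avoids repeated string concatenation.
import Mathlib
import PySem

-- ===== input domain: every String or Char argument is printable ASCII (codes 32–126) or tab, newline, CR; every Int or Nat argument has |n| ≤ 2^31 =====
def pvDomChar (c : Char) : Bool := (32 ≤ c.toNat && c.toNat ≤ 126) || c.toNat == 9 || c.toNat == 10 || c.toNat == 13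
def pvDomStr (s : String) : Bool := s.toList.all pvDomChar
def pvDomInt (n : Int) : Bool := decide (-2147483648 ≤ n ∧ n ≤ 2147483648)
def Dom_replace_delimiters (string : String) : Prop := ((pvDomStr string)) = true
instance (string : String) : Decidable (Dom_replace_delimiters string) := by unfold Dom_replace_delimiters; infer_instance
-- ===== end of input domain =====

-- B replaces A's per-character delimiter-flag state machine with run-grouping (groupby):
-- each delimiter run becomes '*', each non-delimiter run is copied verbatim. Same output, idiomatic decomposition.

-- ===== PORT A =====
-- the eight delimiter characters of A's membership test
def pvIsDelim (c : Char) : Bool := c ∈ ([',', '.', '?', '!', ':', ';', ' ', '\t'] : List Char)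

-- A's loop: walk the characters carrying delimiter_flag, emitting '*' once per delimiter run
def pvLoopA : List Char → Bool → List Char
  | [], _ => []
  | c :: cs, flag =>
    if pvIsDelim c then
      (if flag then pvLoopA cs true else '*' :: pvLoopA cs true)
    else
      c :: pvLoopA cs false

def replace_delimiters (string : String) : String := String.mk (pvLoopA string.toList false)

-- ===== PORT B =====
-- B's groupby loop: split off the maximal run sharing the head's key, emit '*' or the run itself
def pvRunsB : List Char → List Char
  | [] => []
  | c :: cs =>
    (if pvIsDelim c then ['*']
     else (c :: cs).takeWhile (fun x => pvIsDelim x == pvIsDelim c))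
      ++ pvRunsB ((c :: cs).dropWhile (fun x => pvIsDelim x == pvIsDelim c))
  termination_by l => l.length
  decreasing_by
    simp only [List.dropWhile]
    simp
    exact List.length_dropWhile_le _ _

def replace_delimiters_alt (string : String) : String := String.mk (pvRunsB string.toList)

-- ===== PRECONDITION & SPEC =====
def Spec_replace_delimiters (string : String) (out : String) : Prop := out = replace_delimiters_alt string
instance (string : String) (out : String) : Decidable (Spec_replace_delimiters string out) := by unfold Spec_replace_delimiters; infer_instance

-- ===== CLAIM (what is proved, stated in full; the proofs are below) =====
def Claim_equal_replace_delimiters : Prop := ∀ (string : String), Dom_replace_delimiters string → Spec_replace_delimiters string (replace_delimiters string)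

-- ===== LEMMAS AND PROOFS =====

-- with the flag set, A's loop skips a block of delimiters
theorem pvLoopA_skip_delims (l r : List Char) (h : ∀ c ∈ l, pvIsDelim c = true) :
    pvLoopA (l ++ r) true = pvLoopA r true := by
  induction l with
  | nil => rfl
  | cons c cs ih =>
    have hc := h c (List.mem_cons_self ..)
    simp only [List.cons_append, pvLoopA, hc, if_true]
    exact ih (fun x hx => h x (List.mem_cons_of_mem _ hx))

-- with the flag clear, A's loop copies a block of non-delimiters verbatim
theorem pvLoopA_copy (l r : List Char) (h : ∀ c ∈ l, pvIsDelim c = false) :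
    pvLoopA (l ++ r) false = l ++ pvLoopA r false := by
  induction l with
  | nil => rfl
  | cons c cs ih =>
    have hc := h c (List.mem_cons_self ..)
    simp only [List.cons_append, pvLoopA, hc, if_false, Bool.false_eq_true]
    simp only [ih (fun x hx => h x (List.mem_cons_of_mem _ hx))]

-- flag value is irrelevant when the list does not start with a delimiter
theorem pvLoopA_flag_irrel (r : List Char) (h : r = [] ∨ ∃ c cs, r = c :: cs ∧ pvIsDelim c = false) :
    pvLoopA r true = pvLoopA r false := by
  rcases h with h | ⟨c, cs, rfl, hc⟩
  · subst h; rfl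
  · simp [pvLoopA, hc]

-- the head of dropWhile fails the predicate
theorem pvDropWhile_head (p : Char → Bool) (l : List Char) :
    l.dropWhile p = [] ∨ ∃ c cs, l.dropWhile p = c :: cs ∧ p c = false := by
  induction l with
  | nil => exact Or.inl rfl
  | cons c cs ih =>
    by_cases hc : p c = true
    · simpa [List.dropWhile, hc] using ih
    · exact Or.inr ⟨c, cs, by simp [List.dropWhile, hc], by simpa using hc⟩

-- the run decomposition computes A's loop result
theorem pvRunsB_eq_loopA (l : List Char) : pvRunsB l = pvLoopA l false := by
  induction l using pvRunsB.induct with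
  | case1 => simp [pvRunsB, pvLoopA]
  | case2 c cs ih =>
    by_cases hk : pvIsDelim c = true
    · rw [pvRunsB]
      simp only [hk, if_true, beq_true]
      simp only [List.dropWhile_cons, hk, if_true] at ih ⊢
      have hrun : pvLoopA cs true = pvLoopA (cs.dropWhile pvIsDelim) true := by
        conv_lhs => rw [← List.takeWhile_append_dropWhile (p := pvIsDelim) (l := cs)]
        exact pvLoopA_skip_delims _ _ (fun x hx => List.mem_takeWhile_imp hx)
      have hhead := pvDropWhile_head pvIsDelim cs
      have hflag : pvLoopA (cs.dropWhile pvIsDelim) true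
          = pvLoopA (cs.dropWhile pvIsDelim) false := pvLoopA_flag_irrel _ hhead
      simp only [pvLoopA, hk, if_true, hrun, hflag]
      simp at ih ⊢
      exact ih
    · have hk' : pvIsDelim c = false := by simpa using hk
      rw [pvRunsB]
      simp only [hk', if_false, Bool.false_eq_true]
      have hsplit := List.takeWhile_append_dropWhile
        (p := fun x => pvIsDelim x == pvIsDelim c) (l := c :: cs)
      conv_rhs => rw [← hsplit]
      rw [pvLoopA_copy _ _ (fun x hx => by
        have := List.mem_takeWhile_imp hx
        simp only [hk'] at this
        simpa using this)]
      simp only [hk'] at ih ⊢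
      rw [ih]

theorem replace_delimiters_spec : Claim_equal_replace_delimiters := by
  intro s _
  unfold Spec_replace_delimiters replace_delimiters replace_delimiters_alt
  rw [pvRunsB_eq_loopA]
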